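-- pv_equiv track=rewrite | github.com/involutefish/pitch_class_Set_calculator_expansion | find_tetrachords_GUI.py | inversion
-- ===== SOURCE A (Python) =====
-- def inversion(pcs):
--     pcs = {int(x) for x in pcs.split(",") if x.strip().isdigit()}
--     pcs_sorted = sorted(pcs)  # 先对集合进行升序排序
--     inversion_pcs=[]
--     for i in pcs:
--         pitch_class=(12-i) % 12
--         inversion_pcs.append(pitch_class)
--     inversion_pcs=sorted(inversion_pcs)
--     return inversion_pcs
-- ===== SOURCE B (Python) =====
-- def inversion(pcs):
--     # counting sort over the 12 inversion classes; one pass over the tokens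
--     seen = set()
--     counts = [0] * 12
--     for tok in pcs.split(","):
--         if tok.strip().isdigit():
--             v = int(tok)
--             if v not in seen:
--                 seen.add(v)
--                 counts[(12 - v) % 12] += 1
--     return [pc for pc in range(12) for _ in range(counts[pc])]
-- ===== Notes on version B (the rewrite author's own statement) =====
-- stated objective: alternative
-- what changed: B replaces A's build-a-list-then-sort with a single pass that dedups via a seen-set and increments a fixed 12-bucket count array, then emits indices 0..11 with their multiplicities (counting sort), so no comparison sort is performed.
import Mathlib
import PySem

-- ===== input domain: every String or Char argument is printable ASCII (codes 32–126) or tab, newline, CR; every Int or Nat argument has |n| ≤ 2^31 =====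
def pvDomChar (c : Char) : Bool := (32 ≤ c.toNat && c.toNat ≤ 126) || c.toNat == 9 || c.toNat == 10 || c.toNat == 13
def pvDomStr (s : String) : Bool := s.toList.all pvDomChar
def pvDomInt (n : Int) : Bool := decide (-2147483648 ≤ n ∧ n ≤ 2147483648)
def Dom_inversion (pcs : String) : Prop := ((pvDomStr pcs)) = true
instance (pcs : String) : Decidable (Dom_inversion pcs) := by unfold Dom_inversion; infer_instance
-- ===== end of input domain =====

-- B replaces A's build-then-sort by a single pass with a 12-bucket counting sort emitting the sorted result directly (objective: alternative).

-- ===== PORT A =====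
-- {int(x) for x in pcs.split(",") if x.strip().isdigit()} ; the isdigit guard guarantees int(x)
-- succeeds, so (ofStr? x).getD 0 is exact there.  A's unused 'pcs_sorted' line is dead code and is
-- not transcribed.  Iterating the set and then sorting without a key is set-iteration-order
-- independent, so mapping over the Set's element list and sorting is exact.
def inversion (pcs : String) : List Int :=
  let toks := (PySem.Str.split? pcs ",").getD []   -- sep "," ≠ "", so split? is never none
  let s : PySem.Set Int :=
    PySem.Set.ofList ((toks.filter (fun x => PySem.Str.strIsdigit (PySem.Str.strip x))).map
      (fun x => (PySem.Int.ofStr? x).getD 0))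
  let inversion_pcs := s.map (fun i => PySem.Int.mod (12 - i) 12)
  PySem.List.sorted inversion_pcs (fun x => x) false

-- ===== PORT B =====
-- v = int(tok), taken under the isdigit guard of bStep, so getD 0 is exact
def bVal (tok : String) : Int := (PySem.Int.ofStr? tok).getD 0

-- loop body of B: dedup with a seen-set; for each new value bump the bucket of its inversion class
def bStep (st : PySem.Set Int × List Int) (tok : String) : PySem.Set Int × List Int :=
  if PySem.Str.strIsdigit (PySem.Str.strip tok) then
    if PySem.Set.contains st.1 (bVal tok) then st
    else (PySem.Set.add st.1 (bVal tok),
          PySem.List.pySetD st.2 (PySem.Int.mod (12 - bVal tok) 12)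
            (PySem.List.pyGetD st.2 (PySem.Int.mod (12 - bVal tok) 12) 0 + 1))
  else st

-- one pass over the tokens, then emit indices 0..11 with their multiplicities (counting sort)
def inversion_alt (pcs : String) : List Int :=
  let st := ((PySem.Str.split? pcs ",").getD []).foldl bStep
              (PySem.Set.empty, List.replicate 12 (0 : Int))
  (List.range 12).flatMap (fun (pc : Nat) =>
    List.replicate (PySem.List.pyGetD st.2 (pc : Int) 0).toNat ((pc : Int)))

-- ===== PRECONDITION & SPEC =====
def Spec_inversion (pcs : String) (out : List Int) : Prop := out = inversion_alt pcs
instance (pcs : String) (out : List Int) : Decidable (Spec_inversion pcs out) := by unfold Spec_inversion; infer_instance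

-- ===== CLAIM (what is proved, stated in full; the proofs are below) =====
def Claim_equal_inversion : Prop := ∀ (pcs : String), Dom_inversion pcs → Spec_inversion pcs (inversion pcs)

-- ===== LEMMAS AND PROOFS =====

-- the inversion map and the parsed-token list, shared by the proofs
def pvF (i : Int) : Int := PySem.Int.mod (12 - i) 12

def pvParse (toks : List String) : List Int :=
  (toks.filter (fun x => PySem.Str.strIsdigit (PySem.Str.strip x))).map bVal

-- the bucket list B maintains, characterised: slot j holds the multiplicity of class j
def pvCnts (S : List Int) : List Int :=
  (List.range 12).map (fun (j : Nat) => (((S.map pvF).count ((j : Int)) : Nat) : Int))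

lemma pvF_nonneg (i : Int) : 0 ≤ pvF i := PySem.Int.mod_nonneg _ (by norm_num)

lemma pvF_lt (i : Int) : pvF i < 12 := PySem.Int.mod_lt _ (by norm_num)

lemma pvCnts_length (S : List Int) : (pvCnts S).length = 12 := by
  unfold pvCnts; rw [List.length_map, List.length_range]

lemma pvCnts_getElem (S : List Int) (k : Nat) (hk : k < 12) :
    (pvCnts S)[k]'(by rw [pvCnts_length]; exact hk)
      = (((S.map pvF).count ((k : Int)) : Nat) : Int) := by
  unfold pvCnts
  rw [List.getElem_map, List.getElem_range]

lemma pvCnts_bump (S : List Int) (v : Int) :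
    PySem.List.pySetD (pvCnts S) (pvF v) (PySem.List.pyGetD (pvCnts S) (pvF v) 0 + 1)
      = pvCnts (S ++ [v]) := by
  have h0 := pvF_nonneg v
  have hlt := pvF_lt v
  have h1 : pvF v < ((pvCnts S).length : Int) := by rw [pvCnts_length]; exact_mod_cast hlt
  rw [PySem.List.pySetD_of_nonneg _ _ h0, PySem.List.pyGetD_eq_getElem _ _ h0 h1]
  apply List.ext_getElem
  · rw [List.length_set, pvCnts_length, pvCnts_length]
  · intro k hk hk'
    have hk12 : k < 12 := by rw [pvCnts_length] at hk'; exact hk'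
    have hfv12 : (pvF v).toNat < 12 := by omega
    rw [List.getElem_set]
    by_cases hke : (pvF v).toNat = k
    · subst hke
      rw [if_pos rfl, pvCnts_getElem S _ hfv12, pvCnts_getElem (S ++ [v]) _ hfv12,
          List.map_append, List.count_append, List.map_singleton, List.count_singleton]
      have hcast : pvF v = (((pvF v).toNat : Nat) : Int) := by omega
      rw [if_pos (beq_iff_eq.mpr hcast)]
      push_cast
      ring
    · rw [if_neg hke, pvCnts_getElem S k hk12, pvCnts_getElem (S ++ [v]) k hk12,
          List.map_append, List.count_append, List.map_singleton, List.count_singleton]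
      have hcast : ¬ pvF v = ((k : Nat) : Int) := by omega
      rw [if_neg (by simpa using hcast)]
      push_cast
      ring

-- the loop invariant of B's single pass over the token list
lemma pvFold (toks : List String) (acc : List Int) :
    toks.foldl bStep (PySem.Set.ofList acc, pvCnts (PySem.Set.ofList acc))
      = (PySem.Set.ofList (acc ++ pvParse toks), pvCnts (PySem.Set.ofList (acc ++ pvParse toks))) := by
  induction toks generalizing acc with
  | nil => rw [List.foldl_nil]; unfold pvParse; rw [List.filter_nil, List.map_nil, List.append_nil]
  | cons t ts ih =>
    rw [List.foldl_cons]
    by_cases hg : PySem.Str.strIsdigit (PySem.Str.strip t) = true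
    · have hparse : pvParse (t :: ts) = bVal t :: pvParse ts := by
        unfold pvParse
        rw [List.filter_cons, if_pos hg, List.map_cons]
      have happ : acc ++ pvParse (t :: ts) = (acc ++ [bVal t]) ++ pvParse ts := by
        rw [hparse, List.append_cons]
      rw [happ]
      by_cases hc : PySem.Set.contains (PySem.Set.ofList acc) (bVal t) = true
      · have hadd : PySem.Set.ofList (acc ++ [bVal t]) = PySem.Set.ofList acc := by
          rw [PySem.Set.ofList_append_singleton]
          unfold PySem.Set.add
          rw [if_pos hc]
        have hstep : bStep (PySem.Set.ofList acc, pvCnts (PySem.Set.ofList acc)) t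
            = (PySem.Set.ofList (acc ++ [bVal t]), pvCnts (PySem.Set.ofList (acc ++ [bVal t]))) := by
          unfold bStep
          rw [if_pos hg, if_pos hc, hadd]
        rw [hstep, ih]
      · have hadd : PySem.Set.ofList (acc ++ [bVal t]) = PySem.Set.ofList acc ++ [bVal t] := by
          rw [PySem.Set.ofList_append_singleton]
          unfold PySem.Set.add
          rw [if_neg hc]
        have hstep : bStep (PySem.Set.ofList acc, pvCnts (PySem.Set.ofList acc)) t
            = (PySem.Set.ofList (acc ++ [bVal t]), pvCnts (PySem.Set.ofList (acc ++ [bVal t]))) := by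
          unfold bStep
          rw [if_pos hg, if_neg hc, hadd]
          have haddv : (PySem.Set.ofList acc).add (bVal t) = PySem.Set.ofList acc ++ [bVal t] := by
            unfold PySem.Set.add
            rw [if_neg hc]
          rw [haddv]
          exact Prod.ext rfl (pvCnts_bump (PySem.Set.ofList acc) (bVal t))
        rw [hstep, ih]
    · have hparse : pvParse (t :: ts) = pvParse ts := by
        unfold pvParse
        rw [List.filter_cons, if_neg hg]
      have hstep : bStep (PySem.Set.ofList acc, pvCnts (PySem.Set.ofList acc)) t
          = (PySem.Set.ofList acc, pvCnts (PySem.Set.ofList acc)) := by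
        unfold bStep
        rw [if_neg hg]
      rw [hstep, ih, hparse]

-- counting fact about the counting-sort output shape
lemma pvCountFlat (n : Nat) (c : Nat → Nat) (k : Int) :
    ((List.range n).flatMap (fun pc => List.replicate (c pc) (pc : Int))).count k
      = if 0 ≤ k ∧ k < n then c k.toNat else 0 := by
  induction n with
  | zero =>
    rw [List.range_zero, List.flatMap_nil, List.count_nil, if_neg (by omega)]
  | succ n ih =>
    rw [List.range_succ, List.flatMap_append, List.count_append, ih,
        List.flatMap_cons, List.flatMap_nil, List.append_nil, List.count_replicate]
    by_cases hk : ((n : Nat) : Int) = k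
    · rw [if_pos (beq_iff_eq.mpr hk),
          if_neg (show ¬(0 ≤ k ∧ k < (n : Int)) by omega),
          if_pos (show 0 ≤ k ∧ k < ((n + 1 : Nat) : Int) by omega)]
      have hkn : k.toNat = n := by omega
      rw [hkn]
      omega
    · rw [if_neg (show ¬((((n : Nat) : Int)) == k) = true by simpa using hk)]
      by_cases h1 : 0 ≤ k ∧ k < (n : Int)
      · rw [if_pos h1, if_pos (show 0 ≤ k ∧ k < ((n + 1 : Nat) : Int) by omega)]
        omega
      · rw [if_neg h1, if_neg (show ¬(0 ≤ k ∧ k < ((n + 1 : Nat) : Int)) by omega)]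

-- ordering fact about the counting-sort output shape
lemma pvPairwiseFlat (n : Nat) (c : Nat → Nat) :
    List.Pairwise (· ≤ ·) ((List.range n).flatMap (fun pc => List.replicate (c pc) (pc : Int))) := by
  induction n with
  | zero => rw [List.range_zero, List.flatMap_nil]; exact List.Pairwise.nil
  | succ n ih =>
    rw [List.range_succ, List.flatMap_append, List.pairwise_append,
        List.flatMap_cons, List.flatMap_nil, List.append_nil]
    refine ⟨ih, (List.pairwise_replicate).mpr (Or.inr le_rfl), ?_⟩
    intro a ha b hb
    obtain ⟨pc, hpc, hmem⟩ := List.mem_flatMap.mp ha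
    have hpc' : pc < n := List.mem_range.mp hpc
    rw [(List.mem_replicate.mp hmem).2, (List.mem_replicate.mp hb).2]
    exact_mod_cast Nat.le_of_lt hpc'

lemma pvGetCnts (S : List Int) (pc : Nat) (h : pc < 12) :
    PySem.List.pyGetD (pvCnts S) ((pc : Int)) 0
      = (((S.map pvF).count ((pc : Int)) : Nat) : Int) := by
  rw [PySem.List.pyGetD_natCast,
      List.getD_eq_getElem _ _ (by rw [pvCnts_length]; exact h),
      pvCnts_getElem S pc h]

-- ===== VERDICT (by name: the statement is the Claim_ definition above) =====
theorem inversion_spec : Claim_equal_inversion := by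
  intro pcs _
  show inversion pcs = inversion_alt pcs
  have hinit : ((PySem.Set.empty : PySem.Set Int), List.replicate 12 (0 : Int))
      = (PySem.Set.ofList ([] : List Int), pvCnts (PySem.Set.ofList ([] : List Int))) := by decide
  have hA : inversion pcs
      = PySem.List.sorted ((PySem.Set.ofList (pvParse ((PySem.Str.split? pcs ",").getD []))).map pvF)
          (fun x => x) false := rfl
  have hB : inversion_alt pcs
      = (List.range 12).flatMap (fun (pc : Nat) =>
          List.replicate
            (PySem.List.pyGetD
              ((((PySem.Str.split? pcs ",").getD []).foldl bStep
                  ((PySem.Set.empty : PySem.Set Int), List.replicate 12 (0 : Int))).2)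
              ((pc : Int)) 0).toNat ((pc : Int))) := rfl
  rw [hA, hB]
  simp only [hinit, pvFold ((PySem.Str.split? pcs ",").getD []) [], List.nil_append]
  have hflat : ∀ pc ∈ List.range 12,
      List.replicate
        (PySem.List.pyGetD
          (pvCnts (PySem.Set.ofList (pvParse ((PySem.Str.split? pcs ",").getD []))))
          ((pc : Int)) 0).toNat ((pc : Int))
      = List.replicate
          (((PySem.Set.ofList (pvParse ((PySem.Str.split? pcs ",").getD []))).map pvF).count
            ((pc : Int))) ((pc : Int)) := by
    intro pc hpc
    rw [pvGetCnts _ pc (List.mem_range.mp hpc), Int.toNat_natCast]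
  rw [List.flatMap_congr hflat]
  apply PySem.List.sorted_id_eq_of_perm_of_pairwise
  · rw [List.perm_iff_count]
    intro k
    rw [pvCountFlat 12
        (fun pc => ((PySem.Set.ofList (pvParse ((PySem.Str.split? pcs ",").getD []))).map pvF).count
          ((pc : Int))) k]
    by_cases hk : 0 ≤ k ∧ k < ((12 : Nat) : Int)
    · have hcast : ((k.toNat : Nat) : Int) = k := by omega
      rw [if_pos hk]
      simp only [hcast]
    · rw [if_neg hk]
      refine (List.count_eq_zero.mpr ?_).symm
      intro hmem
      obtain ⟨i, _, hi⟩ := List.mem_map.mp hmem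
      have h1 := pvF_nonneg i
      have h2 := pvF_lt i
      omega
  · exact pvPairwiseFlat 12 _
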